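-- pv_equiv track=rewrite | github.com/teddyrendahl/stanford-algs | greedy-algorithms/assignment_2/clustering.py | hamming_possibilities
-- ===== SOURCE A (Python) =====
-- import copy
-- import itertools
--
-- def flip_bit(bit):
--     if bit == 1:
--         return 0
--     if bit == 0:
--         return 1
--
-- def hamming_possibilities(node, distance):
--     """Calculate all possible nodes within a hamming distance of node"""
--     idxs = itertools.combinations(range(len(node)), distance)
--     nodes = list()
--     for shift in idxs:
--         new = copy.copy(node)
--         for pos in shift:
--             new[pos] = flip_bit(node[pos])
--         nodes.append(new)
--     return nodes
-- ===== SOURCE B (Python) =====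
-- def flip_bit(bit):
--     if bit == 1:
--         return 0
--     if bit == 0:
--         return 1
--
-- def hamming_possibilities(node, distance):
--     """Calculate all possible nodes within a hamming distance of node"""
--     if distance < 0:
--         raise ValueError("r must be non-negative")
--     n = len(node)
--     out = []
--     # depth-first walk over positions with a remaining-flip budget; the
--     # flip branch is explored before the leave branch (LIFO stack), which
--     # yields the lexicographic order of flipped index sets.
--     stack = [(0, distance, [])]
--     while stack:
--         pos, budget, built = stack.pop()
--         if budget > n - pos:
--             continue  # not enough positions left to spend the budget
--         if pos == n:
--             if budget == 0:
--                 out.append(built)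
--             continue
--         stack.append((pos + 1, budget, built + [node[pos]]))
--         if budget > 0:
--             stack.append((pos + 1, budget - 1, built + [flip_bit(node[pos])]))
--     return out
-- ===== Notes on version B (the rewrite author's own statement) =====
-- stated objective: alternative
-- what changed: Replaces the itertools.combinations enumeration (copy node, then set each chosen index) by a budgeted depth-first walk over bit positions with an explicit stack that builds each result left-to-right, flip branch before leave branch to keep the lexicographic order.
-- outside the precondition, e.g. on hamming_possibilities([2], 1): A returns [[None]], B returns [[None]]
import Mathlib
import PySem

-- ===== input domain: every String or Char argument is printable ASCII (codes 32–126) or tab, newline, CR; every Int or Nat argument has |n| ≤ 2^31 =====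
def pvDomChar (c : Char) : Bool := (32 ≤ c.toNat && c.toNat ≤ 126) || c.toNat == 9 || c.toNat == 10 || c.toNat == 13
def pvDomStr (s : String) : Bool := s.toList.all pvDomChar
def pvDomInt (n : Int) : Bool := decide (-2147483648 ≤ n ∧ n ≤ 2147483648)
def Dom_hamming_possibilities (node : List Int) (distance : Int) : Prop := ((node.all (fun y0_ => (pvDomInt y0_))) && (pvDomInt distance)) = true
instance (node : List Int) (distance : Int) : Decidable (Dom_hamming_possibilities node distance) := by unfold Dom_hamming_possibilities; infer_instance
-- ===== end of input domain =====

-- B replaces the itertools.combinations enumeration by a budgeted depth-first walk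
-- over bit positions (explicit stack, flip branch first); objective: alternative.

-- ===== PORT A =====
-- Python flip_bit returns None for arguments other than 0/1; inside Pre_ the value
-- is only ever applied to 0 or 1, so the third branch (0 here) is never reached.
def flipBit (bit : Int) : Int := if bit = 1 then 0 else if bit = 0 then 1 else 0

-- itertools.combinations over a list, lexicographic order (exact on sorted index lists)
def combosA : List Nat → Nat → List (List Nat)
  | _, 0 => [[]]
  | [], _ + 1 => []
  | x :: xs, k + 1 => (combosA xs k).map (fun s => x :: s) ++ combosA xs (k + 1)

def hamming_possibilities (node : List Int) (distance : Int) : List (List Int) :=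
  if distance < 0 then []  -- combinations raises ValueError here; outside Pre_
  else
    (combosA (List.range node.length) distance.toNat).foldl
      (fun nodes shift =>
        nodes ++ [shift.foldl (fun new pos => new.set pos (flipBit (node.getD pos 0))) node]) []

-- ===== PORT B =====
-- depth-first walk of Source B's stack, one frame = (remaining positions, budget, built);
-- the explicit LIFO stack is realised as the structural recursion with flip branch first
def goB : List Int → Int → List Int → List (List Int)
  | xs, budget, built =>
    if budget > (xs.length : Int) then []
    else
      match xs with
      | [] => if budget = 0 then [built] else []
      | x :: rest =>
          (if budget > 0 then goB rest (budget - 1) (built ++ [flipBit x]) else []) ++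
            goB rest budget (built ++ [x])
  termination_by xs _ _ => xs.length

def hamming_possibilities_alt (node : List Int) (distance : Int) : List (List Int) :=
  if distance < 0 then []  -- Source B raises ValueError here; outside Pre_
  else goB node distance []

-- ===== PRECONDITION & SPEC =====
-- Pre_ excludes distance < 0, where A raises ValueError (from itertools.combinations),
-- and nodes with an element other than 0/1 when 1 ≤ distance ≤ len(node), where A's
-- returned lists contain None (flip_bit falls through), not a value of type List Int.
def Pre_hamming_possibilities (node : List Int) (distance : Int) : Prop :=
  0 ≤ distance ∧ ((∀ x ∈ node, x = 0 ∨ x = 1) ∨ distance = 0 ∨ (node.length : Int) < distance)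
instance (node : List Int) (distance : Int) : Decidable (Pre_hamming_possibilities node distance) := by
  unfold Pre_hamming_possibilities; infer_instance

def pvWitness_hamming_possibilities : List Int × Int := ([0, 1, 1], 2)

def Spec_hamming_possibilities (node : List Int) (distance : Int) (out : List (List Int)) : Prop := out = hamming_possibilities_alt node distance
instance (node : List Int) (distance : Int) (out : List (List Int)) : Decidable (Spec_hamming_possibilities node distance out) := by unfold Spec_hamming_possibilities; infer_instance

-- ===== CLAIM (what is proved, stated in full; the proofs are below) =====
def Claim_equal_hamming_possibilities : Prop := ∀ (node : List Int) (distance : Int), Dom_hamming_possibilities node distance → Pre_hamming_possibilities node distance → Spec_hamming_possibilities node distance (hamming_possibilities node distance)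

-- ===== LEMMAS AND PROOFS =====

-- the common shape both ports compute: suffix lists of node with exactly k positions
-- flipped, flipped-index sets in lexicographic order
def F : List Int → Nat → List (List Int)
  | [], 0 => [[]]
  | [], _ + 1 => []
  | x :: xs, 0 => (F xs 0).map (fun l => x :: l)
  | x :: xs, k + 1 =>
      (F xs k).map (fun l => flipBit x :: l) ++ (F xs (k + 1)).map (fun l => x :: l)

theorem F_zero (xs : List Int) : F xs 0 = [xs] := by
  induction xs with
  | nil => rfl
  | cons x xs ih => simp [F, ih]

theorem F_gt : ∀ (xs : List Int) (k : Nat), xs.length < k → F xs k = [] := by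
  intro xs
  induction xs with
  | nil => intro k h; cases k with
    | zero => omega
    | succ m => rfl
  | cons x xs ih =>
      intro k h
      cases k with
      | zero => simp at h
      | succ m =>
          simp only [List.length_cons] at h
          show (F xs m).map (fun l => flipBit x :: l) ++ (F xs (m+1)).map (fun l => x :: l) = []
          rw [ih m (by omega), ih (m+1) (by omega)]
          rfl

theorem foldl_app_map {α β : Type} (g : α → β) :
    ∀ (l : List α) (acc : List β),
      l.foldl (fun ns s => ns ++ [g s]) acc = acc ++ l.map g := by
  intro l
  induction l with
  | nil => intro acc; simp
  | cons a l ih => intro acc; simp [List.foldl_cons, ih]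

theorem combosA_map_succ : ∀ (l : List Nat) (k : Nat),
    combosA (l.map (· + 1)) k = (combosA l k).map (List.map (· + 1)) := by
  intro l
  induction l with
  | nil => intro k; cases k <;> rfl
  | cons a l ih =>
      intro k
      cases k with
      | zero => rfl
      | succ m =>
          simp only [List.map_cons, combosA, ih, List.map_append, List.map_map]
          rfl

theorem setshift_cons (x : Int) (xs : List Int) :
    ∀ (s : List Nat) (h : Int) (t : List Int),
      (s.map (· + 1)).foldl (fun new pos => new.set pos (flipBit ((x :: xs).getD pos 0))) (h :: t)
        = h :: s.foldl (fun new pos => new.set pos (flipBit (xs.getD pos 0))) t := by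
  intro s
  induction s with
  | nil => intro h t; rfl
  | cons p s ih =>
      intro h t
      simp only [List.map_cons, List.foldl_cons, List.getD_cons_succ, List.set_cons_succ]
      exact ih h _

theorem combosA_apply_eq_F : ∀ (node : List Int) (k : Nat),
    (combosA (List.range node.length) k).map
        (fun shift => shift.foldl (fun new pos => new.set pos (flipBit (node.getD pos 0))) node)
      = F node k := by
  intro node
  induction node with
  | nil =>
      intro k
      cases k with
      | zero => rfl
      | succ m => rfl
  | cons x xs ih =>
      intro k
      cases k with
      | zero => simp [combosA, F, F_zero]
      | succ m =>
          have hr : List.range (x :: xs).length = 0 :: (List.range xs.length).map (· + 1) := by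
            simp [List.range_succ_eq_map]
          rw [hr]
          simp only [combosA, combosA_map_succ, List.map_append, List.map_map]
          have h1 :
              ((fun shift => shift.foldl
                    (fun new pos => new.set pos (flipBit ((x :: xs).getD pos 0))) (x :: xs)) ∘
                  (fun s => (0 : Nat) :: s) ∘ List.map (· + 1))
                = fun s => flipBit x ::
                    s.foldl (fun new pos => new.set pos (flipBit (xs.getD pos 0))) xs := by
            funext s
            simp only [Function.comp, List.foldl_cons, List.getD_cons_zero, List.set_cons_zero]
            exact setshift_cons x xs s (flipBit x) xs
          have h2 :
              ((fun shift => shift.foldl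
                    (fun new pos => new.set pos (flipBit ((x :: xs).getD pos 0))) (x :: xs)) ∘
                  List.map (· + 1))
                = fun s => x ::
                    s.foldl (fun new pos => new.set pos (flipBit (xs.getD pos 0))) xs := by
            funext s
            exact setshift_cons x xs s x xs
          rw [h1, h2]
          show ((combosA (List.range xs.length) m).map _) ++ ((combosA (List.range xs.length) (m+1)).map _) = F (x :: xs) (m+1)
          have e1 : (combosA (List.range xs.length) m).map
              (fun s => flipBit x :: s.foldl (fun new pos => new.set pos (flipBit (xs.getD pos 0))) xs)
              = (F xs m).map (fun l => flipBit x :: l) := by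
            rw [← ih m, List.map_map]; rfl
          have e2 : (combosA (List.range xs.length) (m+1)).map
              (fun s => x :: s.foldl (fun new pos => new.set pos (flipBit (xs.getD pos 0))) xs)
              = (F xs (m+1)).map (fun l => x :: l) := by
            rw [← ih (m+1), List.map_map]; rfl
          rw [e1, e2]; rfl

theorem goB_eq_F : ∀ (xs : List Int) (k : Nat) (built : List Int),
    goB xs (k : Int) built = (F xs k).map (fun l => built ++ l) := by
  intro xs
  induction xs with
  | nil =>
      intro k built
      cases k with
      | zero => simp [goB, F]
      | succ m => simp [goB, F]
  | cons x xs ih =>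
      intro k built
      by_cases hk : (k : Int) > ((x :: xs).length : Int)
      · rw [goB]
        simp only [hk, if_true]
        rw [F_gt (x :: xs) k (by exact_mod_cast hk)]
        rfl
      · rw [goB]
        simp only [hk, if_false]
        cases k with
        | zero =>
            simp only [Int.natCast_zero]
            norm_num
            rw [show ((0 : Int)) = ((0 : Nat) : Int) from rfl, ih 0 (built ++ [x])]
            simp [F, List.map_map, Function.comp_def]
        | succ m =>
            have hpos : ((m + 1 : Nat) : Int) > 0 := by positivity
            simp only [hpos, if_true]
            have hm1 : ((m + 1 : Nat) : Int) - 1 = ((m : Nat) : Int) := by push_cast; ring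
            rw [hm1, ih m (built ++ [flipBit x]), ih (m + 1) (built ++ [x])]
            simp [F, List.map_map, Function.comp_def, List.map_append]

-- ===== VERDICT (by name: the statement is the Claim_ definition above) =====
theorem hamming_possibilities_spec : Claim_equal_hamming_possibilities := by
  intro node distance _hDom hPre
  unfold Spec_hamming_possibilities
  obtain ⟨hd, -⟩ := hPre
  have hn : ¬ distance < 0 := by omega
  have hcast : ((distance.toNat : Nat) : Int) = distance := Int.toNat_of_nonneg hd
  have hB := goB_eq_F node distance.toNat []
  rw [hcast] at hB
  unfold hamming_possibilities hamming_possibilities_alt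
  simp only [hn, if_false]
  rw [foldl_app_map, List.nil_append, combosA_apply_eq_F, hB]
  simp
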